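-- pv_equiv track=rewrite | github.com/Schrodinger73/Cricket_Scorecard_Bowlers | cricket_bowlers.py | SecondBalls
-- ===== SOURCE A (Python) =====
-- def total(A):
--     return sum(A) - 5*A.count(5)
--
-- def SecondBalls(Balls, Total):
--     if total(Balls) <= Total:
--         return Balls
--     T = 0
--     B = []
--     for i in range(0, len(Balls)):
--         if T <= Total:
--             if Balls[i] != 5:
--                 T += Balls[i]
--             B.append(Balls[i])
--         if T > Total:
--             return B
--     return B
-- ===== SOURCE B (Python) =====
-- def SecondBalls(Balls, Total):
--     # prefix-sum table of non-5 balls (cums[i] = sum of first i counted balls),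
--     # then first-crossing search + slice, instead of an incremental append loop
--     cums = [0]
--     for b in Balls:
--         cums.append(cums[-1] + (b if b != 5 else 0))
--     if cums[-1] <= Total:
--         return Balls
--     for i, c in enumerate(cums):
--         if c > Total:
--             return Balls[:i]
--     return Balls
-- ===== Notes on version B (the rewrite author's own statement) =====
-- stated objective: alternative
-- what changed: Replaced A's incremental append-and-check loop with a prefix-sum table of non-5 balls followed by a first-crossing search and a single slice Balls[:i].
import Mathlib
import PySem

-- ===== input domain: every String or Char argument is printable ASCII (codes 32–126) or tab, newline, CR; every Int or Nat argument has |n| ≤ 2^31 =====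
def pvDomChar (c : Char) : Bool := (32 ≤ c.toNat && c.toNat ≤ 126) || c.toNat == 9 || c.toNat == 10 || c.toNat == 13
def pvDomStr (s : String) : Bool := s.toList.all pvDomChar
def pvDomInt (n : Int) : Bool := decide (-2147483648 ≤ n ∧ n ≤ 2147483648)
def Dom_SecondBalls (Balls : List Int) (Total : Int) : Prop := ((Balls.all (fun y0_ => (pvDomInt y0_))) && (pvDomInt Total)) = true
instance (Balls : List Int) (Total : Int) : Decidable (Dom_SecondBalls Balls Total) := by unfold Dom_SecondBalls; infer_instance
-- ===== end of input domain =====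

-- B replaces A's incremental append loop by a prefix-sum table plus a first-crossing
-- search and one slice (objective: alternative decomposition, same linear cost).

-- ===== PORT A =====
-- total(A) = sum(A) - 5*A.count(5)
def pvTotal (A : List Int) : Int := A.sum - 5 * (PySem.List.count A 5)

-- the 'for i in range(0, len(Balls))' loop with state (T, B) and early return
def SecondBallsLoop (Balls : List Int) (Total : Int) (i : Nat) (T : Int) (B : List Int) : List Int :=
  if h : i < Balls.length then
    let bi := Balls[i]
    let TB := if T ≤ Total then (if bi ≠ 5 then (T + bi, B ++ [bi]) else (T, B ++ [bi])) else (T, B)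
    if TB.1 > Total then TB.2 else SecondBallsLoop Balls Total (i + 1) TB.1 TB.2
  else B
termination_by Balls.length - i

def SecondBalls (Balls : List Int) (Total : Int) : List Int :=
  if pvTotal Balls ≤ Total then Balls
  else SecondBallsLoop Balls Total 0 0 []

-- ===== PORT B =====
-- cums = [0]; for b in Balls: cums.append(cums[-1] + (b if b != 5 else 0))
def pvCums (Balls : List Int) : List Int :=
  Balls.foldl (fun cums b => cums ++ [cums.getLastD 0 + (if b ≠ 5 then b else 0)]) [0]

def SecondBalls_alt (Balls : List Int) (Total : Int) : List Int :=
  let cums := pvCums Balls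
  if cums.getLastD 0 ≤ Total then Balls
  else
    -- 'for i, c in enumerate(cums): if c > Total: return Balls[:i]' — first match + slice
    match cums.findIdx? (fun c => c > Total) with
    | some i => Balls.take i
    | none => Balls

-- ===== PRECONDITION & SPEC =====
def Spec_SecondBalls (Balls : List Int) (Total : Int) (out : List Int) : Prop := out = SecondBalls_alt Balls Total
instance (Balls : List Int) (Total : Int) (out : List Int) : Decidable (Spec_SecondBalls Balls Total out) := by unfold Spec_SecondBalls; infer_instance

-- ===== CLAIM (what is proved, stated in full; the proofs are below) =====
def Claim_equal_SecondBalls : Prop := ∀ (Balls : List Int) (Total : Int), Dom_SecondBalls Balls Total → Spec_SecondBalls Balls Total (SecondBalls Balls Total)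

-- ===== LEMMAS AND PROOFS =====

-- the non-5 increment
def pvG (b : Int) : Int := if b ≠ 5 then b else 0

-- sum of counted (non-5) balls
def pvS (l : List Int) : Int := (l.map pvG).sum

theorem pvS_nil : pvS [] = 0 := rfl
theorem pvS_cons (b : Int) (bs : List Int) : pvS (b :: bs) = pvG b + pvS bs := by
  simp [pvS]

theorem pvTotal_eq (l : List Int) : pvTotal l = pvS l := by
  induction l with
  | nil => rfl
  | cons b bs ih =>
    simp [pvTotal, pvS, pvG, PySem.List.count, List.count_cons] at *
    by_cases h : b = 5 <;> simp [h] <;> push_cast at * <;> omega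

-- A's loop, structurally over the remaining suffix
def loopL (Total : Int) : List Int → Int → List Int → List Int
  | [], _, B => B
  | b :: bs, T, B =>
    let TB := if T ≤ Total then (if b ≠ 5 then (T + b, B ++ [b]) else (T, B ++ [b])) else (T, B)
    if TB.1 > Total then TB.2 else loopL Total bs TB.1 TB.2

theorem loop_eq_loopL (Balls : List Int) (Total : Int) :
    ∀ i T B, SecondBallsLoop Balls Total i T B = loopL Total (Balls.drop i) T B := by
  intro i
  induction hn : Balls.length - i using Nat.strong_induction_on generalizing i with
  | _ n ih =>
    intro T B
    rw [SecondBallsLoop]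
    by_cases h : i < Balls.length
    · rw [dif_pos h, List.drop_eq_getElem_cons h]
      simp only [loopL]
      repeat' split
      all_goals first
        | rfl
        | exact ih (Balls.length - (i + 1)) (by omega) (i + 1) rfl _ _
    · rw [dif_neg h, List.drop_eq_nil_of_le (Nat.le_of_not_lt h)]; rfl

-- prefix actually returned by the loop when T ≤ Total
def takeCross (Total : Int) : List Int → Int → List Int
  | [], _ => []
  | b :: bs, T =>
    if T + pvG b > Total then [b] else b :: takeCross Total bs (T + pvG b)

theorem loopL_eq_takeCross (Total : Int) :
    ∀ (bs : List Int) (T : Int) (B : List Int), T ≤ Total →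
      loopL Total bs T B = B ++ takeCross Total bs T := by
  intro bs
  induction bs with
  | nil => intro T B _; simp [loopL, takeCross]
  | cons b bs ih =>
    intro T B hT
    simp only [loopL, if_pos hT, takeCross]
    by_cases h5 : b = 5
    · subst h5
      have hg : pvG 5 = 0 := by simp [pvG]
      simp only [ne_eq, not_true_eq_false, if_false, hg, add_zero]
      rw [if_neg (show ¬ ((T, B ++ [(5:Int)]).1 > Total) by simpa using hT),
        if_neg (show ¬ T > Total by omega), ih T (B ++ [5]) hT]
      simp
    · have hg : pvG b = b := by simp [pvG, h5]
      simp only [ne_eq, h5, not_false_eq_true, if_true, hg]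
      by_cases hc : T + b > Total
      · rw [if_pos (show ((T + b, B ++ [b]).1 > Total) by simpa using hc), if_pos hc]
      · rw [if_neg (show ¬ ((T + b, B ++ [b]).1 > Total) by simpa using hc), if_neg hc,
          ih (T + b) (B ++ [b]) (by omega)]
        simp

-- the cums table is a scanl
theorem cums_aux :
    ∀ (l init : List Int) (a : Int),
      List.foldl (fun cums b => cums ++ [cums.getLastD 0 + (if b ≠ 5 then b else 0)]) (init ++ [a]) l
        = init ++ List.scanl (fun x b => x + pvG b) a l := by
  intro l
  induction l with
  | nil => intro init a; simp [List.scanl_nil]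
  | cons b bs ih =>
    intro init a
    rw [List.foldl_cons]
    have h1 : (init ++ [a]).getLastD 0 = a := by simp
    rw [h1]
    have h2 : (init ++ [a]) ++ [a + (if b ≠ 5 then b else 0)] = (init ++ [a]) ++ [a + pvG b] := by
      simp [pvG]
    rw [h2, ih (init ++ [a]) (a + pvG b)]
    simp [List.scanl_cons]

theorem pvCums_eq_scanl (Balls : List Int) :
    pvCums Balls = List.scanl (fun x b => x + pvG b) 0 Balls := by
  have := cums_aux Balls [] 0
  simpa [pvCums] using this

theorem scanl_ne_nil' (a : Int) (l : List Int) :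
    ∃ t, List.scanl (fun x b => x + pvG b) a l = a :: t := by
  cases l with
  | nil => exact ⟨[], List.scanl_nil⟩
  | cons b bs => exact ⟨_, List.scanl_cons⟩

theorem scanl_last (l : List Int) :
    ∀ a d : Int, (List.scanl (fun x b => x + pvG b) a l).getLastD d = a + pvS l := by
  induction l with
  | nil => intro a d; simp [List.scanl, pvS]
  | cons b bs ih =>
    intro a d
    rw [List.scanl_cons, List.getLastD_cons]
    obtain ⟨t, ht⟩ := scanl_ne_nil' (a + pvG b) bs
    rw [ih (a + pvG b) a, pvS_cons]
    ring

-- crossing search on the scanl matches takeCross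
theorem findIdx_scanl (Total : Int) :
    ∀ (bs : List Int) (T : Int), T ≤ Total → T + pvS bs > Total →
      ∃ i, (List.scanl (fun x b => x + pvG b) T bs).findIdx? (fun c => decide (c > Total)) = some i ∧
        bs.take i = takeCross Total bs T := by
  intro bs
  induction bs with
  | nil => intro T h1 h2; rw [pvS_nil] at h2; omega
  | cons b bs ih =>
    intro T h1 h2
    rw [List.scanl_cons, List.findIdx?_cons, if_neg (by simpa using not_lt.mpr h1)]
    by_cases hc : T + pvG b > Total
    · obtain ⟨t, ht⟩ := scanl_ne_nil' (T + pvG b) bs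
      refine ⟨1, ?_, ?_⟩
      · rw [ht, List.findIdx?_cons, if_pos (by simpa using hc)]
        rfl
      · simp [takeCross, hc]
    · rw [not_lt] at hc
      have h2' : (T + pvG b) + pvS bs > Total := by rw [pvS_cons] at h2; omega
      obtain ⟨j, hj1, hj2⟩ := ih (T + pvG b) hc h2'
      refine ⟨j + 1, ?_, ?_⟩
      · rw [hj1]; rfl
      · rw [List.take_succ_cons, hj2, takeCross, if_neg (by omega)]

-- ===== VERDICT (by name: the statement is the Claim_ definition above) =====
theorem SecondBalls_spec : Claim_equal_SecondBalls := by
  intro Balls Total _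
  unfold Spec_SecondBalls SecondBalls SecondBalls_alt
  simp only [pvCums_eq_scanl, pvTotal_eq]
  obtain ⟨t, ht⟩ := scanl_ne_nil' 0 Balls
  rw [scanl_last Balls 0 0, zero_add]
  by_cases hg : pvS Balls ≤ Total
  · simp [hg]
  · rw [if_neg hg, if_neg hg, loop_eq_loopL Balls Total 0 0 [], List.drop_zero]
    by_cases h0 : (0 : Int) ≤ Total
    · obtain ⟨i, hi1, hi2⟩ := findIdx_scanl Total Balls 0 h0 (by omega)
      rw [loopL_eq_takeCross Total Balls 0 [] h0, List.nil_append, hi1, ← hi2]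
    · have hfi : (List.scanl (fun x b => x + pvG b) 0 Balls).findIdx? (fun c => decide (c > Total)) = some 0 := by
        rw [ht, List.findIdx?_cons, if_pos (by simp; omega)]
      rw [hfi]
      cases Balls with
      | nil => rfl
      | cons b bs => simp [loopL, h0, show (0:Int) > Total by omega]
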